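-- pv_equiv track=rewrite | github.com/spacemanidol/UWLING | 572/Assignments/hw3/build_NB2.py | countDocsInClassForAllTerms
-- ===== SOURCE A (Python) =====
-- def countDocsInClassForAllTerms(trainingData):
--     classes = set(trainingData[0])
--     N = len(trainingData[1])
--     Nct= {}
--     Vc = {}
--     for i in range(N):
--         document = trainingData[1][i]
--         c = trainingData[0][i]
--         if c not in Vc:
--             Vc[c] = 0
--         for t in document:
--             if c not in Nct:
--                 Nct[c] = {}
--             if t not in Nct[c]:
--                 Nct[c][t] = 0
--             Vc[c] += trainingData[1][i][t]
--             Nct[c][t] += trainingData[1][i][t]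
--     return Nct, Vc
-- ===== SOURCE B (Python) =====
-- def countDocsInClassForAllTerms(trainingData):
--     labels, docs = trainingData
--     N = len(docs)
--     # every class seen gets a Vc entry, in first-occurrence order
--     Vc = dict.fromkeys(labels[:N], 0)
--     # flat accumulator keyed by (class, term) composite keys
--     flat = {}
--     for c, doc in zip(labels, docs):
--         for t, v in doc.items():
--             flat[(c, t)] = flat.get((c, t), 0) + v
--     # rebuild the nested per-class term-count dicts from the flat table
--     Nct = {}
--     for (c, t), v in flat.items():
--         Nct.setdefault(c, {})[t] = v
--     # class totals are the flat table summed per class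
--     for (c, t), v in flat.items():
--         Vc[c] += v
--     return Nct, Vc
-- ===== Notes on version B (the rewrite author's own statement) =====
-- stated objective: alternative
-- what changed: B replaces A's nested per-class dict accumulation with a single flat accumulator keyed by (class, term) composite keys, then rebuilds the nested Nct and the per-class totals Vc from that flat table in two post-passes; the class skeleton of Vc comes from dict.fromkeys instead of per-iteration membership tests.
import Mathlib
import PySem

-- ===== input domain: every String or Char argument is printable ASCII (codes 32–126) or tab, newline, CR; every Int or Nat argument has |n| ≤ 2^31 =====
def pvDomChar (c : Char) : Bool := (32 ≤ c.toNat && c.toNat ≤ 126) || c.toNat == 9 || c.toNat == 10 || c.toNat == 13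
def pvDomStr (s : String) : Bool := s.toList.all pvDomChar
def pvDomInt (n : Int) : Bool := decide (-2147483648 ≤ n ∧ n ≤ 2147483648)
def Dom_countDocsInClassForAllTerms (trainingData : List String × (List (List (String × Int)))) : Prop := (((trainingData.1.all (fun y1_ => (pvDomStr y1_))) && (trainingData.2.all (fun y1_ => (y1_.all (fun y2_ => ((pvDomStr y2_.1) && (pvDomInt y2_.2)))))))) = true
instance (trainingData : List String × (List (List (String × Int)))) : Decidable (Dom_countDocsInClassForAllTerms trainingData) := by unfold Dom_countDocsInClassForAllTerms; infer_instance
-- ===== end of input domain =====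

-- B replaces A's nested per-class accumulation by a flat (class, term)-keyed accumulator with two
-- reconstruction post-passes ("alternative": a different data structure, no speed claimed).

-- ===== PORT A =====
-- inner 'for t in document' body of A (Vc[c] += trainingData[1][i][t]; Nct[c][t] += …)
def pvInnerA (c : String) (document : PySem.Dict String Int)
    (st : PySem.Dict String (PySem.Dict String Int) × PySem.Dict String Int) (t : String × Int) :
    PySem.Dict String (PySem.Dict String Int) × PySem.Dict String Int :=
  let nct := if st.1.contains c then st.1 else st.1.insert c PySem.Dict.empty
  let nct := if (nct.getD c PySem.Dict.empty).contains t.1 then nct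
             else nct.insert c ((nct.getD c PySem.Dict.empty).insert t.1 0)
  let x := document.getD t.1 0
  let vc := st.2.insert c (st.2.getD c 0 + x)
  let nct := nct.insert c ((nct.getD c PySem.Dict.empty).insert t.1
               ((nct.getD c PySem.Dict.empty).getD t.1 0 + x))
  (nct, vc)

-- one iteration of A's 'for i in range(N)' loop (pyGet? totalized with a default; unreachable under Pre_)
def pvStepA (labels : List String) (docs : List (List (String × Int)))
    (st : PySem.Dict String (PySem.Dict String Int) × PySem.Dict String Int) (i : Int) :
    PySem.Dict String (PySem.Dict String Int) × PySem.Dict String Int :=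
  let document := PySem.Dict.ofList ((PySem.List.pyGet? docs i).getD [])
  let c := (PySem.List.pyGet? labels i).getD ""
  let vc := if st.2.contains c then st.2 else st.2.insert c 0
  document.items.foldl (pvInnerA c document) (st.1, vc)

def countDocsInClassForAllTerms (trainingData : List String × (List (List (String × Int)))) :
    (List (String × List (String × Int))) × (List (String × Int)) :=
  let _classes := PySem.Set.ofList trainingData.1
  let N : Int := trainingData.2.length
  let r := (PySem.List.pyRange 0 N 1).foldl (pvStepA trainingData.1 trainingData.2)
             (PySem.Dict.empty, PySem.Dict.empty)
  (r.1.items.map (fun p => (p.1, p.2.items)), r.2.items)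

-- ===== PORT B =====
def countDocsInClassForAllTerms_alt (trainingData : List String × (List (List (String × Int)))) :
    (List (String × List (String × Int))) × (List (String × Int)) :=
  let labels := trainingData.1
  let docs := trainingData.2
  let N : Int := docs.length
  -- Vc = dict.fromkeys(labels[:N], 0)
  let vc0 : PySem.Dict String Int :=
    (PySem.List.slice labels none (some N)).foldl (fun d c => d.insert c 0) PySem.Dict.empty
  -- flat[(c, t)] = flat.get((c, t), 0) + v
  let flat : PySem.Dict (String × String) Int :=
    (labels.zip docs).foldl (fun f cd =>
      (PySem.Dict.ofList cd.2).items.foldl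
        (fun f tv => f.insert (cd.1, tv.1) (f.getD (cd.1, tv.1) 0 + tv.2)) f)
      PySem.Dict.empty
  -- Nct.setdefault(c, {})[t] = v
  let nct : PySem.Dict String (PySem.Dict String Int) :=
    flat.items.foldl (fun n p =>
      let n1 := n.setdefault p.1.1 PySem.Dict.empty
      n1.insert p.1.1 ((n1.getD p.1.1 PySem.Dict.empty).insert p.1.2 p.2)) PySem.Dict.empty
  -- Vc[c] += v
  let vc := flat.items.foldl (fun v p => v.insert p.1.1 (v.getD p.1.1 0 + p.2)) vc0
  (nct.items.map (fun p => (p.1, p.2.items)), vc.items)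

-- ===== PRECONDITION & SPEC =====
-- A raises IndexError on trainingData[0][i] when the label list is shorter than the document list
def Pre_countDocsInClassForAllTerms (trainingData : List String × (List (List (String × Int)))) : Prop :=
  trainingData.2.length ≤ trainingData.1.length
instance (trainingData : List String × (List (List (String × Int)))) : Decidable (Pre_countDocsInClassForAllTerms trainingData) := by unfold Pre_countDocsInClassForAllTerms; infer_instance
def pvWitness_countDocsInClassForAllTerms : (List String × (List (List (String × Int)))) :=
  (["a", "b"], [[("x", 2), ("y", 3)], [("x", 1)]])

def Spec_countDocsInClassForAllTerms (trainingData : List String × (List (List (String × Int)))) (out : (List (String × List (String × Int))) × (List (String × Int))) : Prop := out = countDocsInClassForAllTerms_alt trainingData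
instance (trainingData : List String × (List (List (String × Int)))) (out : (List (String × List (String × Int))) × (List (String × Int))) : Decidable (Spec_countDocsInClassForAllTerms trainingData out) := by unfold Spec_countDocsInClassForAllTerms; infer_instance

-- ===== CLAIM (what is proved, stated in full; the proofs are below) =====
def Claim_equal_countDocsInClassForAllTerms : Prop := ∀ (trainingData : List String × (List (List (String × Int)))), Dom_countDocsInClassForAllTerms trainingData → Pre_countDocsInClassForAllTerms trainingData → Spec_countDocsInClassForAllTerms trainingData (countDocsInClassForAllTerms trainingData)
-- ===== LEMMAS AND PROOFS =====
-- ===== proof-side definitions =====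
-- the event stream: one ((class, term), value) entry per term occurrence, in sweep order
def pvEvs (Z : List (String × List (String × Int))) : List ((String × String) × Int) :=
  Z.flatMap (fun cd => (PySem.Dict.ofList cd.2).items.map (fun tv => ((cd.1, tv.1), tv.2)))

def pvKeySum (E : List ((String × String) × Int)) (k : String × String) : Int :=
  ((E.filter (fun p => decide (p.1 = k))).map (fun p => p.2)).sum
def pvClassSum (E : List ((String × String) × Int)) (c : String) : Int :=
  ((E.filter (fun p => decide (p.1.1 = c))).map (fun p => p.2)).sum
def pvClasses (E : List ((String × String) × Int)) : List String :=
  PySem.Set.ofList (E.map (fun p => p.1.1))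
def pvTerms (E : List ((String × String) × Int)) (c : String) : List String :=
  PySem.Set.ofList ((E.filter (fun p => decide (p.1.1 = c))).map (fun p => p.1.2))
def pvKeys (E : List ((String × String) × Int)) : List (String × String) :=
  PySem.Set.ofList (E.map (fun p => p.1))

-- A's nested accumulation, per event
def pvEStep (n : PySem.Dict String (PySem.Dict String Int)) (p : (String × String) × Int) :
    PySem.Dict String (PySem.Dict String Int) :=
  let n1 := if n.contains p.1.1 then n else n.insert p.1.1 PySem.Dict.empty
  let n2 := if (n1.getD p.1.1 PySem.Dict.empty).contains p.1.2 then n1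
            else n1.insert p.1.1 ((n1.getD p.1.1 PySem.Dict.empty).insert p.1.2 0)
  n2.insert p.1.1 ((n2.getD p.1.1 PySem.Dict.empty).insert p.1.2
    ((n2.getD p.1.1 PySem.Dict.empty).getD p.1.2 0 + p.2))

-- B's pass-2 step
def pvN2Step (n : PySem.Dict String (PySem.Dict String Int)) (p : (String × String) × Int) :
    PySem.Dict String (PySem.Dict String Int) :=
  let n1 := n.setdefault p.1.1 PySem.Dict.empty
  n1.insert p.1.1 ((n1.getD p.1.1 PySem.Dict.empty).insert p.1.2 p.2)

-- A's Vc update across one zipped (class, document) entry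
def pvVZStep (v : PySem.Dict String Int) (cd : String × List (String × Int)) : PySem.Dict String Int :=
  (PySem.Dict.ofList cd.2).items.foldl
    (fun v tv => v.insert cd.1 (v.getD cd.1 0 + (PySem.Dict.ofList cd.2).getD tv.1 0))
    (if v.contains cd.1 then v else v.insert cd.1 0)

-- A's Nct update across one zipped entry
def pvNStep (c : String) (doc : PySem.Dict String Int)
    (n : PySem.Dict String (PySem.Dict String Int)) (tv : String × Int) :
    PySem.Dict String (PySem.Dict String Int) :=
  let n1 := if n.contains c then n else n.insert c PySem.Dict.empty
  let n2 := if (n1.getD c PySem.Dict.empty).contains tv.1 then n1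
            else n1.insert c ((n1.getD c PySem.Dict.empty).insert tv.1 0)
  n2.insert c ((n2.getD c PySem.Dict.empty).insert tv.1
    ((n2.getD c PySem.Dict.empty).getD tv.1 0 + doc.getD tv.1 0))
def pvNZStep (n : PySem.Dict String (PySem.Dict String Int)) (cd : String × List (String × Int)) :
    PySem.Dict String (PySem.Dict String Int) :=
  (PySem.Dict.ofList cd.2).items.foldl (pvNStep cd.1 (PySem.Dict.ofList cd.2)) n

-- ===== generic list/set lemmas specific to these folds =====
theorem pvSumBump {α : Type} [DecidableEq α] (l : List α) (hl : l.Nodup) (k : α) (hk : k ∈ l)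
    (f : α → Int) (v : Int) :
    (l.map (fun j => f j + if j = k then v else 0)).sum = (l.map f).sum + v := by
  induction l with
  | nil => cases hk
  | cons a as ih =>
    rcases List.mem_cons.mp hk with h | h
    · subst h
      have hna : k ∉ as := (List.nodup_cons.mp hl).1
      have heq : as.map (fun j => f j + if j = k then v else 0) = as.map f :=
        List.map_congr_left (fun j hj => by
          have : j ≠ k := by rintro rfl; exact hna hj
          simp [this])
      simp [heq]
      ring
    · have ha : a ≠ k := by rintro rfl; exact (List.nodup_cons.mp hl).1 h
      simp only [List.map_cons, List.sum_cons, if_neg ha]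
      rw [ih (List.nodup_cons.mp hl).2 h]
      ring

theorem pvFiltEq {α : Type} [DecidableEq α] (l : List α) (hl : l.Nodup) (k : α) :
    l.filter (fun j => decide (j = k)) = if k ∈ l then [k] else [] := by
  induction l with
  | nil => simp
  | cons a as ih =>
    rcases List.nodup_cons.mp hl with ⟨hna, hnd⟩
    by_cases ha : a = k
    · subst ha
      simp [ih hnd, hna]
    · have : k ∈ a :: as ↔ k ∈ as := by simp [Ne.symm ha]
      simp [ha, ih hnd, this]

theorem pvSetMapOfList {α β : Type} [BEq α] [LawfulBEq α] [BEq β] [LawfulBEq β] (l : List α) (f : α → β) :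
    PySem.Set.ofList ((PySem.Set.ofList l).map f) = PySem.Set.ofList (l.map f) := by
  induction l using List.reverseRecOn with
  | nil => rfl
  | append_singleton l x ih =>
    rw [PySem.Set.ofList_append_singleton, List.map_append, List.map_singleton,
      PySem.Set.ofList_append_singleton]
    by_cases hx : x ∈ PySem.Set.ofList l
    · rw [PySem.Set.add_of_mem hx, ih]
      have : f x ∈ PySem.Set.ofList (l.map f) :=
        (PySem.Set.mem_ofList _ _).mpr (List.mem_map_of_mem ((PySem.Set.mem_ofList _ _).mp hx))
      rw [PySem.Set.add_of_mem this]
    · rw [PySem.Set.add_of_not_mem hx, List.map_append, List.map_singleton,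
        PySem.Set.ofList_append_singleton, ih]

theorem pvSetFilter {α : Type} [BEq α] [LawfulBEq α] (l : List α) (p : α → Bool) :
    (PySem.Set.ofList l).filter p = PySem.Set.ofList (l.filter p) := by
  induction l using List.reverseRecOn with
  | nil => rfl
  | append_singleton l x ih =>
    rw [PySem.Set.ofList_append_singleton]
    by_cases hx : x ∈ PySem.Set.ofList l
    · rw [PySem.Set.add_of_mem hx]
      by_cases hp : p x = true
      · have hfl : List.filter p (l ++ [x]) = List.filter p l ++ [x] := by
          simp [List.filter_append, hp]
        rw [ih, hfl, PySem.Set.ofList_append_singleton, PySem.Set.add_of_mem]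
        exact (PySem.Set.mem_ofList _ _).mpr
          (List.mem_filter.mpr ⟨(PySem.Set.mem_ofList _ _).mp hx, hp⟩)
      · have hfl : List.filter p (l ++ [x]) = List.filter p l := by
          simp [List.filter_append, hp]
        rw [ih, hfl]
    · rw [PySem.Set.add_of_not_mem hx, List.filter_append, ih]
      by_cases hp : p x = true
      · have hfl : List.filter p (l ++ [x]) = List.filter p l ++ [x] := by
          simp [List.filter_append, hp]
        have hxf : x ∉ PySem.Set.ofList (List.filter p l) := by
          intro hmem
          exact hx ((PySem.Set.mem_ofList _ _).mpr
            (List.mem_of_mem_filter ((PySem.Set.mem_ofList _ _).mp hmem)))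
        rw [hfl, PySem.Set.ofList_append_singleton, PySem.Set.add_of_not_mem hxf]
        simp [hp]
      · have hfl : List.filter p (l ++ [x]) = List.filter p l := by
          simp [List.filter_append, hp]
        rw [hfl]
        simp [hp]

theorem pvVAdd {β κ : Type} [BEq κ] [LawfulBEq κ] [DecidableEq κ] (l : List β) (key : β → κ) (g : β → Int) :
    ∀ (v : PySem.Dict κ Int) (c : κ),
    (l.foldl (fun v x => v.insert (key x) (v.getD (key x) 0 + g x)) v).getD c 0
      = v.getD c 0 + ((l.filter (fun x => decide (key x = c))).map g).sum := by
  induction l with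
  | nil => intro v c; simp
  | cons x xs ih =>
    intro v c
    rw [List.foldl_cons, ih, PySem.Dict.getD_insert]
    rcases eq_or_ne (key x) c with hx | hx
    · subst hx
      rw [if_pos rfl]
      have hf : List.filter (fun y => decide (key y = key x)) (x :: xs)
          = x :: List.filter (fun y => decide (key y = key x)) xs := by
        simp
      rw [hf, List.map_cons, List.sum_cons]
      ring
    · rw [if_neg (Ne.symm hx)]
      have hf : List.filter (fun y => decide (key y = c)) (x :: xs)
          = List.filter (fun y => decide (key y = c)) xs := by
        simp [hx]
      rw [hf]

theorem pvVKeys {β κ : Type} [BEq κ] [LawfulBEq κ] (l : List β) (key : β → κ) (g : PySem.Dict κ Int → β → Int)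
    (v : PySem.Dict κ Int) (h : ∀ x ∈ l, key x ∈ v.keys) :
    (l.foldl (fun v x => v.insert (key x) (g v x)) v).keys = v.keys := by
  rw [PySem.Dict.keys_foldl_insert_key l key g v, PySem.Set.update_eq_append_filter]
  have : List.filter (fun y => !PySem.Set.contains v.keys y) (PySem.Set.ofList (l.map key)) = [] := by
    rw [List.filter_eq_nil_iff]
    intro y hy
    rcases List.mem_map.mp ((PySem.Set.mem_ofList _ _).mp hy) with ⟨x, hx, rfl⟩
    simp [PySem.Set.contains, h x hx]
  rw [this, List.append_nil]

theorem pvKeySumZero (E : List ((String × String) × Int)) (k : String × String)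
    (h : k ∉ E.map (fun p => p.1)) : pvKeySum E k = 0 := by
  unfold pvKeySum
  have : E.filter (fun p => decide (p.1 = k)) = [] := by
    rw [List.filter_eq_nil_iff]
    intro p hp hpk
    exact h (List.mem_map.mpr ⟨p, hp, by simpa using hpk⟩)
  rw [this]
  rfl

theorem pvKeySumApp (E : List ((String × String) × Int)) (x : (String × String) × Int) (k : String × String) :
    pvKeySum (E ++ [x]) k = pvKeySum E k + if k = x.1 then x.2 else 0 := by
  unfold pvKeySum
  rw [List.filter_append, List.map_append, List.sum_append]
  rcases eq_or_ne k x.1 with h | h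
  · simp [h]
  · simp [Ne.symm h, h]

theorem pvClassSumApp (E : List ((String × String) × Int)) (x : (String × String) × Int) (c : String) :
    pvClassSum (E ++ [x]) c = pvClassSum E c + if x.1.1 = c then x.2 else 0 := by
  unfold pvClassSum
  rw [List.filter_append, List.map_append, List.sum_append]
  rcases eq_or_ne x.1.1 c with h | h
  · simp [h]
  · simp [h]

-- ===== characterizations =====
theorem pvTermsMem (E : List ((String × String) × Int)) (c t : String) :
    t ∈ pvTerms E c ↔ (c, t) ∈ E.map (fun p => p.1) := by
  unfold pvTerms
  rw [PySem.Set.mem_ofList]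
  constructor
  · intro h
    rcases List.mem_map.mp h with ⟨p, hp, rfl⟩
    rcases List.mem_filter.mp hp with ⟨hpE, hpc⟩
    have hc : p.1.1 = c := by simpa using hpc
    exact List.mem_map.mpr ⟨p, hpE, by rw [← hc]⟩
  · intro h
    rcases List.mem_map.mp h with ⟨p, hp, hpk⟩
    refine List.mem_map.mpr ⟨p, List.mem_filter.mpr ⟨hp, by simp [hpk]⟩, ?_⟩
    rw [hpk]

theorem pvClassesApp (E : List ((String × String) × Int)) (x : (String × String) × Int) :
    pvClasses (E ++ [x]) = PySem.Set.add (pvClasses E) x.1.1 := by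
  unfold pvClasses
  rw [List.map_append, List.map_singleton, PySem.Set.ofList_append_singleton]

theorem pvTermsApp (E : List ((String × String) × Int)) (x : (String × String) × Int) (c : String) :
    pvTerms (E ++ [x]) c
      = if x.1.1 = c then PySem.Set.add (pvTerms E c) x.1.2 else pvTerms E c := by
  unfold pvTerms
  rw [List.filter_append]
  rcases eq_or_ne x.1.1 c with h | h
  · rw [if_pos h, show List.filter (fun p => decide (p.1.1 = c)) [x] = [x] by simp [h],
      List.map_append, List.map_singleton, PySem.Set.ofList_append_singleton]
  · rw [if_neg h, show List.filter (fun p => decide (p.1.1 = c)) [x] = [] by simp [h],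
      List.append_nil]

theorem pvFChar (E : List ((String × String) × Int)) :
    (E.foldl (fun f p => f.insert p.1 (f.getD p.1 0 + p.2)) PySem.Dict.empty).keys = pvKeys E
    ∧ ∀ k, (E.foldl (fun f p => f.insert p.1 (f.getD p.1 0 + p.2)) PySem.Dict.empty).getD k 0 = pvKeySum E k := by
  constructor
  · rw [PySem.Dict.keys_foldl_insert_key E (fun p => p.1) (fun d p => d.getD p.1 0 + p.2)]
    rw [PySem.Dict.keys_empty, PySem.Set.update_nil_left]
    rfl
  · intro k
    rw [pvVAdd E (fun p => p.1) (fun p => p.2) PySem.Dict.empty k, PySem.Dict.getD_empty]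
    unfold pvKeySum
    simp

theorem pvNAChar (E : List ((String × String) × Int)) :
    (E.foldl pvEStep PySem.Dict.empty).keys = pvClasses E
    ∧ (∀ c, ((E.foldl pvEStep PySem.Dict.empty).getD c PySem.Dict.empty).keys = pvTerms E c)
    ∧ (∀ c t, ((E.foldl pvEStep PySem.Dict.empty).getD c PySem.Dict.empty).getD t 0 = pvKeySum E (c, t)) := by
  induction E using List.reverseRecOn with
  | nil =>
    refine ⟨?_, fun c => ?_, fun c t => ?_⟩ <;>
      simp [pvClasses, pvTerms, pvKeySum, PySem.Dict.getD_empty, PySem.Dict.keys_empty]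
  | append_singleton E x ih =>
    obtain ⟨h1, h2, h3⟩ := ih
    rw [List.foldl_append, List.foldl_cons, List.foldl_nil]
    have hcon : ∀ c, (E.foldl pvEStep PySem.Dict.empty).contains c = decide (c ∈ pvClasses E) :=
      fun c => by rw [PySem.Dict.contains_eq_decide_mem_keys, h1]
    have hconI : ∀ c t, ((E.foldl pvEStep PySem.Dict.empty).getD c PySem.Dict.empty).contains t
        = decide (t ∈ pvTerms E c) :=
      fun c t => by rw [PySem.Dict.contains_eq_decide_mem_keys, h2 c]
    obtain ⟨⟨c, t⟩, v⟩ := x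
    set n := E.foldl pvEStep PySem.Dict.empty with hn
    by_cases hc : c ∈ pvClasses E
    · have hcontc : n.contains c = true := by rw [hcon]; simpa
      by_cases ht : t ∈ pvTerms E c
      · -- class and term already present
        have hcontt : (n.getD c PySem.Dict.empty).contains t = true := by rw [hconI]; simpa
        have hstep : pvEStep n ((c, t), v)
            = n.insert c ((n.getD c PySem.Dict.empty).insert t
                ((n.getD c PySem.Dict.empty).getD t 0 + v)) := by
          unfold pvEStep
          simp only [hcontc, hcontt, if_true]
        rw [hstep]
        refine ⟨?_, fun c' => ?_, fun c' t' => ?_⟩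
        · rw [PySem.Dict.keys_insert_of_contains _ _ hcontc, h1, pvClassesApp,
            PySem.Set.add_of_mem hc]
        · rw [PySem.Dict.getD_insert, pvTermsApp]
          rcases eq_or_ne c' c with rfl | hne
          · rw [if_pos rfl, if_pos rfl, PySem.Dict.keys_insert_of_contains _ _ hcontt, h2,
              PySem.Set.add_of_mem ht]
          · rw [if_neg hne, if_neg (fun hh => hne hh.symm)]
            exact h2 c'
        · rw [PySem.Dict.getD_insert, pvKeySumApp]
          rcases eq_or_ne c' c with rfl | hne
          · rw [if_pos rfl, PySem.Dict.getD_insert]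
            rcases eq_or_ne t' t with rfl | hnt
            · rw [if_pos rfl, h3 _ t', if_pos rfl]
            · rw [if_neg hnt, h3 _ t', if_neg (by simp [hnt])]
              simp
          · rw [if_neg hne, h3 c' t', if_neg (by simp [hne])]
            simp
      · -- class present, term new
        have hcontt : (n.getD c PySem.Dict.empty).contains t = false := by rw [hconI]; simpa
        have hks0 : pvKeySum E (c, t) = 0 := by
          apply pvKeySumZero
          intro hmem
          exact ht ((pvTermsMem E c t).mpr hmem)
        have hstep : pvEStep n ((c, t), v)
            = n.insert c ((n.getD c PySem.Dict.empty).insert t (0 + v)) := by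
          unfold pvEStep
          simp only [hcontc, hcontt, if_true, Bool.false_eq_true, if_false,
            PySem.Dict.getD_insert_self, PySem.Dict.insert_insert_self]
        rw [hstep]
        refine ⟨?_, fun c' => ?_, fun c' t' => ?_⟩
        · rw [PySem.Dict.keys_insert_of_contains _ _ hcontc, h1, pvClassesApp,
            PySem.Set.add_of_mem hc]
        · rw [PySem.Dict.getD_insert, pvTermsApp]
          rcases eq_or_ne c' c with rfl | hne
          · rw [if_pos rfl, if_pos rfl, PySem.Dict.keys_insert_of_not_contains _ _ hcontt, h2,
              PySem.Set.add_of_not_mem ht]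
          · rw [if_neg hne, if_neg (fun hh => hne hh.symm)]
            exact h2 c'
        · rw [PySem.Dict.getD_insert, pvKeySumApp]
          rcases eq_or_ne c' c with rfl | hne
          · rw [if_pos rfl, PySem.Dict.getD_insert]
            rcases eq_or_ne t' t with rfl | hnt
            · rw [if_pos rfl, if_pos rfl, hks0]
            · rw [if_neg hnt, h3 _ t', if_neg (by simp [hnt])]
              simp
          · rw [if_neg hne, h3 c' t', if_neg (by simp [hne])]
            simp
    · -- class new
      have hcontc : n.contains c = false := by rw [hcon]; simpa
      have hinner : n.getD c PySem.Dict.empty = PySem.Dict.empty :=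
        PySem.Dict.getD_of_not_contains _ _ hcontc
      have hterms : pvTerms E c = [] := by
        rw [← h2 c, hinner, PySem.Dict.keys_empty]
      have hksz : ∀ t', pvKeySum E (c, t') = 0 := by
        intro t'
        apply pvKeySumZero
        intro hmem
        have : t' ∈ pvTerms E c := (pvTermsMem E c t').mpr hmem
        rw [hterms] at this
        cases this
      have hstep : pvEStep n ((c, t), v)
          = n.insert c ((PySem.Dict.empty : PySem.Dict String Int).insert t (0 + v)) := by
        unfold pvEStep
        simp only [hcontc, Bool.false_eq_true, if_false, PySem.Dict.getD_insert_self,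
          PySem.Dict.contains_empty, PySem.Dict.insert_insert_self]
      rw [hstep]
      refine ⟨?_, fun c' => ?_, fun c' t' => ?_⟩
      · rw [PySem.Dict.keys_insert_of_not_contains _ _ hcontc, h1, pvClassesApp,
          PySem.Set.add_of_not_mem hc]
      · rw [PySem.Dict.getD_insert, pvTermsApp]
        rcases eq_or_ne c' c with rfl | hne
        · rw [if_pos rfl, if_pos rfl, PySem.Dict.keys_insert_of_not_contains _ _
            (PySem.Dict.contains_empty _), hterms, PySem.Set.add_of_not_mem (List.not_mem_nil),
            PySem.Dict.keys_empty]
        · rw [if_neg hne, if_neg (fun hh => hne hh.symm)]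
          exact h2 c'
      · rw [PySem.Dict.getD_insert, pvKeySumApp]
        rcases eq_or_ne c' c with rfl | hne
        · rw [if_pos rfl, PySem.Dict.getD_insert]
          rcases eq_or_ne t' t with rfl | hnt
          · rw [if_pos rfl]
            simp [hksz]
          · rw [if_neg hnt, PySem.Dict.getD_empty, hksz t', if_neg (by simp [hnt])]
            simp
        · rw [if_neg hne, h3 c' t', if_neg (by simp [hne])]
          simp

theorem pvN2Char (L : List ((String × String) × Int)) (hnd : (L.map (fun p => p.1)).Nodup) :
    (L.foldl pvN2Step PySem.Dict.empty).keys = pvClasses L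
    ∧ (∀ c, ((L.foldl pvN2Step PySem.Dict.empty).getD c PySem.Dict.empty).keys = pvTerms L c)
    ∧ (∀ c t, ((L.foldl pvN2Step PySem.Dict.empty).getD c PySem.Dict.empty).getD t 0 = pvKeySum L (c, t)) := by
  induction L using List.reverseRecOn with
  | nil =>
    refine ⟨?_, fun c => ?_, fun c t => ?_⟩ <;>
      simp [pvClasses, pvTerms, pvKeySum, PySem.Dict.getD_empty, PySem.Dict.keys_empty]
  | append_singleton L x ih =>
    rw [List.map_append] at hnd
    have hx1 : x.1 ∉ L.map (fun p => p.1) := by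
      intro hmem
      have hthis := List.nodup_append.mp hnd
      simp at hthis
      rcases List.mem_map.mp hmem with ⟨p, hp, hpk⟩
      exact hthis.2 p.1.1 p.1.2 p.2 (by simpa using hp) (by simpa using hpk)
    obtain ⟨h1, h2, h3⟩ := ih (List.nodup_append.mp hnd).1
    rw [List.foldl_append, List.foldl_cons, List.foldl_nil]
    have hcon : ∀ c, (L.foldl pvN2Step PySem.Dict.empty).contains c = decide (c ∈ pvClasses L) :=
      fun c => by rw [PySem.Dict.contains_eq_decide_mem_keys, h1]
    obtain ⟨⟨c, t⟩, v⟩ := x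
    set n := L.foldl pvN2Step PySem.Dict.empty with hn
    have ht : t ∉ pvTerms L c := by
      intro hmem
      exact hx1 ((pvTermsMem L c t).mp hmem)
    have hcontt : (n.getD c PySem.Dict.empty).contains t = false := by
      rw [PySem.Dict.contains_eq_decide_mem_keys, h2 c]
      simpa
    have hks0 : pvKeySum L (c, t) = 0 := pvKeySumZero L (c, t) hx1
    by_cases hc : c ∈ pvClasses L
    · have hcontc : n.contains c = true := by rw [hcon]; simpa
      have hstep : pvN2Step n ((c, t), v)
          = n.insert c ((n.getD c PySem.Dict.empty).insert t v) := by
        unfold pvN2Step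
        rw [PySem.Dict.setdefault_of_contains _ _ hcontc]
      rw [hstep]
      refine ⟨?_, fun c' => ?_, fun c' t' => ?_⟩
      · rw [PySem.Dict.keys_insert_of_contains _ _ hcontc, h1, pvClassesApp,
          PySem.Set.add_of_mem hc]
      · rw [PySem.Dict.getD_insert, pvTermsApp]
        rcases eq_or_ne c' c with rfl | hne
        · rw [if_pos rfl, if_pos rfl, PySem.Dict.keys_insert_of_not_contains _ _ hcontt, h2,
            PySem.Set.add_of_not_mem ht]
        · rw [if_neg hne, if_neg (fun hh => hne hh.symm)]
          exact h2 c'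
      · rw [PySem.Dict.getD_insert, pvKeySumApp]
        rcases eq_or_ne c' c with rfl | hne
        · rw [if_pos rfl, PySem.Dict.getD_insert]
          rcases eq_or_ne t' t with rfl | hnt
          · rw [if_pos rfl, if_pos rfl, hks0]
            simp
          · rw [if_neg hnt, h3 _ t', if_neg (by simp [hnt])]
            simp
        · rw [if_neg hne, h3 c' t', if_neg (by simp [hne])]
          simp
    · have hcontc : n.contains c = false := by rw [hcon]; simpa
      have hinner : n.getD c PySem.Dict.empty = PySem.Dict.empty :=
        PySem.Dict.getD_of_not_contains _ _ hcontc
      have hterms : pvTerms L c = [] := by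
        rw [← h2 c, hinner, PySem.Dict.keys_empty]
      have hksz : ∀ t', pvKeySum L (c, t') = 0 := by
        intro t'
        apply pvKeySumZero
        intro hmem
        have : t' ∈ pvTerms L c := (pvTermsMem L c t').mpr hmem
        rw [hterms] at this
        cases this
      have hstep : pvN2Step n ((c, t), v)
          = n.insert c ((PySem.Dict.empty : PySem.Dict String Int).insert t v) := by
        unfold pvN2Step
        rw [PySem.Dict.setdefault_of_not_contains _ _ hcontc]
        simp only [PySem.Dict.getD_insert_self, PySem.Dict.insert_insert_self]
      rw [hstep]
      refine ⟨?_, fun c' => ?_, fun c' t' => ?_⟩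
      · rw [PySem.Dict.keys_insert_of_not_contains _ _ hcontc, h1, pvClassesApp,
          PySem.Set.add_of_not_mem hc]
      · rw [PySem.Dict.getD_insert, pvTermsApp]
        rcases eq_or_ne c' c with rfl | hne
        · rw [if_pos rfl, if_pos rfl, PySem.Dict.keys_insert_of_not_contains _ _
            (PySem.Dict.contains_empty _), hterms, PySem.Set.add_of_not_mem (List.not_mem_nil),
            PySem.Dict.keys_empty]
        · rw [if_neg hne, if_neg (fun hh => hne hh.symm)]
          exact h2 c'
      · rw [PySem.Dict.getD_insert, pvKeySumApp]
        rcases eq_or_ne c' c with rfl | hne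
        · rw [if_pos rfl, PySem.Dict.getD_insert]
          rcases eq_or_ne t' t with rfl | hnt
          · rw [if_pos rfl]
            simp [hksz]
          · rw [if_neg hnt, PySem.Dict.getD_empty, hksz t', if_neg (by simp [hnt])]
            simp
        · rw [if_neg hne, h3 c' t', if_neg (by simp [hne])]
          simp

theorem pvEvsApp (Z : List (String × List (String × Int))) (cd : String × List (String × Int)) :
    pvEvs (Z ++ [cd]) = pvEvs Z
      ++ (PySem.Dict.ofList cd.2).items.map (fun tv => ((cd.1, tv.1), tv.2)) := by
  unfold pvEvs
  rw [List.flatMap_append]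
  simp

theorem pvClassSumAppList (E F : List ((String × String) × Int)) (c : String) :
    pvClassSum (E ++ F) c = pvClassSum E c + pvClassSum F c := by
  unfold pvClassSum
  rw [List.filter_append, List.map_append, List.sum_append]

theorem pvClassSumTag (c : String) (items : List (String × Int)) (c' : String) :
    pvClassSum (items.map (fun tv => ((c, tv.1), tv.2))) c'
      = if c = c' then (items.map (fun tv => tv.2)).sum else 0 := by
  unfold pvClassSum
  rw [List.filter_map]
  rcases eq_or_ne c c' with rfl | hne
  · simp [Function.comp_def]
  · simp [Function.comp_def, hne]

theorem pvVAChar (Z : List (String × List (String × Int))) :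
    (Z.foldl pvVZStep PySem.Dict.empty).keys = PySem.Set.ofList (Z.map (fun cd => cd.1))
    ∧ ∀ c, (Z.foldl pvVZStep PySem.Dict.empty).getD c 0 = pvClassSum (pvEvs Z) c := by
  induction Z using List.reverseRecOn with
  | nil =>
    constructor
    · rfl
    · intro c
      simp [pvEvs, pvClassSum, PySem.Dict.getD_empty]
  | append_singleton Z cd ih =>
    obtain ⟨h1, h2⟩ := ih
    rw [List.foldl_append, List.foldl_cons, List.foldl_nil]
    set VA := Z.foldl pvVZStep PySem.Dict.empty with hVA
    have hcon : ∀ c, VA.contains c = decide (c ∈ PySem.Set.ofList (Z.map (fun cd => cd.1))) :=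
      fun c => by rw [PySem.Dict.contains_eq_decide_mem_keys, h1]
    have hensure0 : ∀ c,
        (if VA.contains cd.1 then VA else VA.insert cd.1 0).getD c 0 = VA.getD c 0 := by
      intro c
      by_cases hm : VA.contains cd.1 = true
      · rw [if_pos hm]
      · rw [if_neg hm, PySem.Dict.getD_insert]
        rcases eq_or_ne c cd.1 with rfl | hne
        · rw [if_pos rfl, PySem.Dict.getD_of_not_contains VA 0 (by simpa using hm)]
        · rw [if_neg hne]
    have hekeys : (if VA.contains cd.1 then VA else VA.insert cd.1 0).keys
        = PySem.Set.add (PySem.Set.ofList (Z.map (fun cd => cd.1))) cd.1 := by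
      by_cases hm : cd.1 ∈ PySem.Set.ofList (Z.map (fun cd => cd.1))
      · rw [if_pos (by rw [hcon]; exact decide_eq_true hm), h1, PySem.Set.add_of_mem hm]
      · rw [if_neg (by rw [hcon]; simp only [decide_eq_false hm]; exact Bool.false_ne_true),
          PySem.Dict.keys_insert_of_not_contains _ _ (by rw [hcon]; exact decide_eq_false hm),
          h1, PySem.Set.add_of_not_mem hm]
    have hstep : pvVZStep VA cd
        = (PySem.Dict.ofList cd.2).items.foldl
            (fun v tv => v.insert cd.1 (v.getD cd.1 0 + (PySem.Dict.ofList cd.2).getD tv.1 0))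
            (if VA.contains cd.1 then VA else VA.insert cd.1 0) := rfl
    rw [hstep]
    constructor
    · have hk := pvVKeys (PySem.Dict.ofList cd.2).items (fun _ => cd.1)
        (fun v tv => v.getD cd.1 0 + (PySem.Dict.ofList cd.2).getD tv.1 0)
        (if VA.contains cd.1 then VA else VA.insert cd.1 0)
        (fun tv _ => by
          rw [hekeys]
          exact (PySem.Set.mem_add _ _ _).mpr (Or.inr rfl))
      rw [hk, hekeys, List.map_append, List.map_singleton, PySem.Set.ofList_append_singleton]
    · intro c
      have hv := pvVAdd (PySem.Dict.ofList cd.2).items (fun _ => cd.1)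
        (fun tv => (PySem.Dict.ofList cd.2).getD tv.1 0)
        (if VA.contains cd.1 then VA else VA.insert cd.1 0) c
      rw [hv, hensure0, h2, pvEvsApp, pvClassSumAppList, pvClassSumTag]
      congr 1
      rcases eq_or_ne cd.1 c with rfl | hne
      · rw [if_pos rfl]
        have hfilt : (PySem.Dict.ofList cd.2).items.filter (fun tv => decide (cd.1 = cd.1))
            = (PySem.Dict.ofList cd.2).items := by simp
        rw [hfilt]
        apply congrArg
        apply List.map_congr_left
        intro tv htv
        exact PySem.Dict.getD_of_mem_items (PySem.Dict.ofList cd.2) (by simpa using htv)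
          (PySem.Dict.nodup_keys_ofList _) 0
      · rw [if_neg hne]
        have hfilt : (PySem.Dict.ofList cd.2).items.filter (fun tv => decide (cd.1 = c))
            = [] := by simp [hne]
        rw [hfilt]
        rfl

theorem pvPartition (E : List ((String × String) × Int)) (c : String) :
    (((pvKeys E).filter (fun k => decide (k.1 = c))).map (pvKeySum E)).sum = pvClassSum E c := by
  induction E using List.reverseRecOn with
  | nil => rfl
  | append_singleton E x ih =>
    have hK : (pvKeys E).Nodup := by unfold pvKeys; exact PySem.Set.nodup_ofList _
    have hkeys : pvKeys (E ++ [x]) = PySem.Set.add (pvKeys E) x.1 := by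
      unfold pvKeys
      rw [List.map_append, List.map_singleton, PySem.Set.ofList_append_singleton]
    rw [hkeys, pvClassSumApp]
    by_cases hm : x.1 ∈ pvKeys E
    · rw [PySem.Set.add_of_mem hm]
      have hmap : ((pvKeys E).filter (fun k => decide (k.1 = c))).map (pvKeySum (E ++ [x]))
          = ((pvKeys E).filter (fun k => decide (k.1 = c))).map
              (fun k => pvKeySum E k + if k = x.1 then x.2 else 0) :=
        List.map_congr_left (fun k _ => pvKeySumApp E x k)
      rw [hmap]
      by_cases hc : x.1.1 = c
      · have hxf : x.1 ∈ (pvKeys E).filter (fun k => decide (k.1 = c)) :=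
          List.mem_filter.mpr ⟨hm, by simp [hc]⟩
        rw [pvSumBump _ (hK.filter _) x.1 hxf (pvKeySum E) x.2, ih, if_pos hc]
      · have hmap2 : ((pvKeys E).filter (fun k => decide (k.1 = c))).map
              (fun k => pvKeySum E k + if k = x.1 then x.2 else 0)
            = ((pvKeys E).filter (fun k => decide (k.1 = c))).map (pvKeySum E) := by
          apply List.map_congr_left
          intro k hk
          have hkc : k.1 = c := by simpa using (List.mem_filter.mp hk).2
          have : k ≠ x.1 := by rintro rfl; exact hc hkc
          simp [this]
        rw [hmap2, ih, if_neg hc]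
        ring
    · rw [PySem.Set.add_of_not_mem hm, List.filter_append, List.map_append, List.sum_append]
      have hmap : ((pvKeys E).filter (fun k => decide (k.1 = c))).map (pvKeySum (E ++ [x]))
          = ((pvKeys E).filter (fun k => decide (k.1 = c))).map (pvKeySum E) := by
        apply List.map_congr_left
        intro k hk
        rw [pvKeySumApp]
        have : k ≠ x.1 := by
          rintro rfl
          exact hm (List.mem_filter.mp hk).1
        simp [this]
      rw [hmap, ih]
      have hzero : pvKeySum E x.1 = 0 := by
        apply pvKeySumZero
        intro hmem
        exact hm (by unfold pvKeys; exact (PySem.Set.mem_ofList _ _).mpr hmem)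
      by_cases hc : x.1.1 = c
      · have : List.filter (fun k => decide (k.1 = c)) [x.1] = [x.1] := by simp [hc]
        rw [this, if_pos hc]
        simp [pvKeySumApp, hzero]
      · have : List.filter (fun k => decide (k.1 = c)) [x.1] = [] := by simp [hc]
        rw [this, if_neg hc]
        simp

theorem pvMemCls (Z : List (String × List (String × Int))) (p : (String × String) × Int)
    (hp : p ∈ pvEvs Z) : p.1.1 ∈ Z.map (fun cd => cd.1) := by
  unfold pvEvs at hp
  rcases List.mem_flatMap.mp hp with ⟨cd, hcd, hmem⟩
  rcases List.mem_map.mp hmem with ⟨tv, _, rfl⟩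
  exact List.mem_map.mpr ⟨cd, hcd, rfl⟩

-- ===== bridging the ports to the folds =====
theorem pvZipFold (labels : List String) (docs : List (List (String × Int)))
    (h : docs.length ≤ labels.length) (s : PySem.Dict String (PySem.Dict String Int) × PySem.Dict String Int) :
    (PySem.List.pyRange 0 (docs.length : Int) 1).foldl (pvStepA labels docs) s
      = (labels.zip docs).foldl
          (fun st cd => (PySem.Dict.ofList cd.2).items.foldl (pvInnerA cd.1 (PySem.Dict.ofList cd.2))
            (st.1, if st.2.contains cd.1 then st.2 else st.2.insert cd.1 0)) s := by
  have hlen : (labels.zip docs).length = docs.length := by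
    rw [List.length_zip]; omega
  have hcast : ((docs.length : Int)) = ((labels.zip docs).length : Int) := by
    exact_mod_cast congrArg Nat.cast hlen.symm
  rw [hcast]
  refine (PySem.List.foldl_congr_mem _ _ (fun st i =>
    (fun st (cd : String × List (String × Int)) =>
      (PySem.Dict.ofList cd.2).items.foldl (pvInnerA cd.1 (PySem.Dict.ofList cd.2))
        (st.1, if st.2.contains cd.1 then st.2 else st.2.insert cd.1 0)) st
      (PySem.List.pyGetD (labels.zip docs) i ("", ([] : List (String × Int))))) _
    ?_).trans (PySem.List.foldl_pyRange_zero_pyGetD' (labels.zip docs) ("", [])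
      (fun st (cd : String × List (String × Int)) =>
        (PySem.Dict.ofList cd.2).items.foldl (pvInnerA cd.1 (PySem.Dict.ofList cd.2))
          (st.1, if st.2.contains cd.1 then st.2 else st.2.insert cd.1 0)) s)
  · intro st i hi
    dsimp only
    rcases PySem.List.mem_pyRange_one.mp hi with ⟨hi0, hi1⟩
    have hiz : i < ((labels.zip docs).length : Int) := hi1
    have hid : i < (docs.length : Int) := by omega
    have hil : i < (labels.length : Int) := by
      have := h; omega
    have hzip : PySem.List.pyGetD (labels.zip docs) i ("", ([] : List (String × Int)))
        = (labels.zip docs)[i.toNat]'(by omega) := by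
      exact PySem.List.pyGetD_eq_getElem _ _ hi0 hiz
    have hgz : (labels.zip docs)[i.toNat]'(by omega)
        = (labels[i.toNat]'(by omega), docs[i.toNat]'(by omega)) := List.getElem_zip
    unfold pvStepA
    rw [show (PySem.List.pyGet? docs i).getD [] = PySem.List.pyGetD docs i [] from rfl,
      show (PySem.List.pyGet? labels i).getD "" = PySem.List.pyGetD labels i "" from rfl,
      PySem.List.pyGetD_eq_getElem docs [] hi0 hid,
      PySem.List.pyGetD_eq_getElem labels "" hi0 hil,
      hzip, hgz]

theorem pvSplit (Z : List (String × List (String × Int))) :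
    Z.foldl (fun st cd => (PySem.Dict.ofList cd.2).items.foldl (pvInnerA cd.1 (PySem.Dict.ofList cd.2))
        (st.1, if st.2.contains cd.1 then st.2 else st.2.insert cd.1 0))
      (PySem.Dict.empty, PySem.Dict.empty)
      = (Z.foldl pvNZStep PySem.Dict.empty, Z.foldl pvVZStep PySem.Dict.empty) := by
  suffices H : ∀ s : PySem.Dict String (PySem.Dict String Int) × PySem.Dict String Int,
      Z.foldl (fun st cd => (PySem.Dict.ofList cd.2).items.foldl
          (pvInnerA cd.1 (PySem.Dict.ofList cd.2))
          (st.1, if st.2.contains cd.1 then st.2 else st.2.insert cd.1 0)) s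
        = (Z.foldl pvNZStep s.1, Z.foldl pvVZStep s.2) by
    exact H (PySem.Dict.empty, PySem.Dict.empty)
  induction Z with
  | nil => intro s; simp
  | cons cd Z ih =>
    intro s
    have hsplit : (PySem.Dict.ofList cd.2).items.foldl
        (pvInnerA cd.1 (PySem.Dict.ofList cd.2))
        (s.1, if s.2.contains cd.1 then s.2 else s.2.insert cd.1 0)
        = (pvNZStep s.1 cd, pvVZStep s.2 cd) := by
      refine (PySem.List.foldl_congr_mem _ _
        (fun (st : PySem.Dict String (PySem.Dict String Int) × PySem.Dict String Int)
            (tv : String × Int) =>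
          (pvNStep cd.1 (PySem.Dict.ofList cd.2) st.1 tv,
           st.2.insert cd.1 (st.2.getD cd.1 0 + (PySem.Dict.ofList cd.2).getD tv.1 0))) _
        (fun acc tv _ => rfl)).trans ?_
      exact PySem.List.foldl_prod_mk (pvNStep cd.1 (PySem.Dict.ofList cd.2))
        (fun v (tv : String × Int) =>
          v.insert cd.1 (v.getD cd.1 0 + (PySem.Dict.ofList cd.2).getD tv.1 0))
        (PySem.Dict.ofList cd.2).items s.1
        (if s.2.contains cd.1 then s.2 else s.2.insert cd.1 0)
    rw [List.foldl_cons, List.foldl_cons, List.foldl_cons, hsplit, ih]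

theorem pvNZtoE (Z : List (String × List (String × Int))) :
    Z.foldl pvNZStep PySem.Dict.empty = (pvEvs Z).foldl pvEStep PySem.Dict.empty := by
  unfold pvEvs
  rw [List.foldl_flatMap]
  apply PySem.List.foldl_congr_mem
  intro acc cd _
  rw [List.foldl_map]
  apply PySem.List.foldl_congr_mem
  intro acc2 tv htv
  show pvNStep cd.1 (PySem.Dict.ofList cd.2) acc2 tv = pvEStep acc2 ((cd.1, tv.1), tv.2)
  unfold pvNStep pvEStep
  rw [PySem.Dict.getD_of_mem_items (PySem.Dict.ofList cd.2) (by simpa using htv)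
    (PySem.Dict.nodup_keys_ofList _) 0]

theorem pvFlatToE (Z : List (String × List (String × Int))) :
    Z.foldl (fun f cd => (PySem.Dict.ofList cd.2).items.foldl
        (fun f tv => f.insert (cd.1, tv.1) (f.getD (cd.1, tv.1) 0 + tv.2)) f) PySem.Dict.empty
      = (pvEvs Z).foldl (fun f p => f.insert p.1 (f.getD p.1 0 + p.2)) PySem.Dict.empty := by
  unfold pvEvs
  rw [List.foldl_flatMap]
  apply PySem.List.foldl_congr_mem
  intro acc cd _
  rw [List.foldl_map]

theorem pvZfst (labels : List String) (docs : List (List (String × Int))) (h : docs.length ≤ labels.length) :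
    (labels.zip docs).map (fun cd => cd.1) = labels.take docs.length := by
  induction docs generalizing labels with
  | nil => simp
  | cons d ds ih =>
    cases labels with
    | nil => simp at h
    | cons a ls =>
      simp only [List.zip_cons_cons, List.map_cons, List.length_cons, List.take_succ_cons]
      rw [ih ls (by simpa using h)]

theorem pvVc0getD (l : List String) : ∀ (v : PySem.Dict String Int) (c : String), v.getD c 0 = 0 →
    (l.foldl (fun d c => d.insert c (0 : Int)) v).getD c 0 = 0 := by
  induction l with
  | nil => intro v c h; exact h
  | cons x xs ih =>
    intro v c h
    rw [List.foldl_cons]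
    apply ih
    rw [PySem.Dict.getD_insert]
    split_ifs <;> simp [h]


-- ===== VERDICT (by name: the statement is the Claim_ definition above) =====
theorem countDocsInClassForAllTerms_spec : Claim_equal_countDocsInClassForAllTerms := by
  intro td _ pre
  unfold Pre_countDocsInClassForAllTerms at pre
  unfold Spec_countDocsInClassForAllTerms countDocsInClassForAllTerms countDocsInClassForAllTerms_alt
  dsimp only
  -- A side reduced to the event fold and the Vc fold
  have hA : (PySem.List.pyRange 0 ((td.2.length : Int)) 1).foldl (pvStepA td.1 td.2)
      (PySem.Dict.empty, PySem.Dict.empty)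
      = ((pvEvs (td.1.zip td.2)).foldl pvEStep PySem.Dict.empty,
         (td.1.zip td.2).foldl pvVZStep PySem.Dict.empty) := by
    rw [pvZipFold td.1 td.2 pre, pvSplit, pvNZtoE]
  rw [hA]
  -- B side: the flat dict
  rw [pvFlatToE (td.1.zip td.2)]
  set E := pvEvs (td.1.zip td.2) with hE
  set F := E.foldl (fun f p => f.insert p.1 (f.getD p.1 0 + p.2)) PySem.Dict.empty with hFdef
  obtain ⟨hFk, hFg⟩ := pvFChar E
  rw [← hFdef] at hFk hFg
  have hFnd : F.keys.Nodup := by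
    rw [hFk]; unfold pvKeys; exact PySem.Set.nodup_ofList _
  have hFitems : F.items = (pvKeys E).map (fun k => (k, pvKeySum E k)) := by
    rw [PySem.Dict.items_eq_map_keys F hFnd 0, hFk]
    exact List.map_congr_left (fun k _ => by rw [hFg k])
  have hFindnd : (F.items.map (fun p => p.1)).Nodup := by
    have : F.items.map (fun p => p.1) = F.keys := rfl
    rw [this]; exact hFnd
  -- translate the N2 characterization to E
  have hcls : pvClasses F.items = pvClasses E := by
    unfold pvClasses
    rw [hFitems, List.map_map]
    have h1 : ((fun (p : (String × String) × Int) => p.1.1) ∘ (fun k => (k, pvKeySum E k)))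
        = fun (k : String × String) => k.1 := rfl
    rw [h1]
    have h2 : (pvKeys E).map (fun (k : String × String) => k.1)
        = (pvKeys E).map Prod.fst := rfl
    unfold pvKeys
    rw [pvSetMapOfList (E.map (fun p => p.1)) (fun k => k.1), List.map_map]
    rfl
  have hterms : ∀ c, pvTerms F.items c = pvTerms E c := by
    intro c
    unfold pvTerms
    rw [hFitems, List.filter_map, List.map_map]
    have h1 : ((fun (p : (String × String) × Int) => decide (p.1.1 = c))
        ∘ (fun k => (k, pvKeySum E k))) = fun (k : String × String) => decide (k.1 = c) := rfl
    have h2 : ((fun (p : (String × String) × Int) => p.1.2) ∘ (fun k => (k, pvKeySum E k)))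
        = fun (k : String × String) => k.2 := rfl
    rw [h1, h2]
    have h3 : (pvKeys E).filter (fun k => decide (k.1 = c))
        = PySem.Set.ofList ((E.filter (fun p => decide (p.1.1 = c))).map (fun p => p.1)) := by
      unfold pvKeys
      rw [pvSetFilter (E.map (fun p => p.1)) (fun k => decide (k.1 = c)), List.filter_map]
      rfl
    rw [h3, pvSetMapOfList ((E.filter (fun p => decide (p.1.1 = c))).map (fun p => p.1))
      (fun k => k.2), List.map_map]
    rfl
  have hks : ∀ c t, pvKeySum F.items (c, t) = pvKeySum E (c, t) := by
    intro c t
    unfold pvKeySum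
    rw [hFitems, List.filter_map, List.map_map]
    have h1 : ((fun (p : (String × String) × Int) => decide (p.1 = (c, t)))
        ∘ (fun k => (k, pvKeySum E k))) = fun (k : String × String) => decide (k = (c, t)) := rfl
    have h2 : ((fun (p : (String × String) × Int) => p.2) ∘ (fun k => (k, pvKeySum E k)))
        = fun (k : String × String) => pvKeySum E k := rfl
    rw [h1, h2, pvFiltEq (pvKeys E) (by unfold pvKeys; exact PySem.Set.nodup_ofList _) (c, t)]
    by_cases hm : (c, t) ∈ pvKeys E
    · rw [if_pos hm]
      show pvKeySum E (c, t) + 0 = _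
      unfold pvKeySum
      ring
    · rw [if_neg hm]
      have : pvKeySum E (c, t) = 0 := by
        apply pvKeySumZero
        intro hmem
        exact hm (by unfold pvKeys; exact (PySem.Set.mem_ofList _ _).mpr hmem)
      unfold pvKeySum at this ⊢
      rw [this]
      rfl
  -- the nested dicts agree
  obtain ⟨hA1, hA2, hA3⟩ := pvNAChar E
  have hN2pre := pvN2Char F.items hFindnd
  obtain ⟨hB1, hB2, hB3⟩ := hN2pre
  have hlam : (fun (n : PySem.Dict String (PySem.Dict String Int)) (p : (String × String) × Int) =>
      let n1 := n.setdefault p.1.1 PySem.Dict.empty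
      n1.insert p.1.1 ((n1.getD p.1.1 PySem.Dict.empty).insert p.1.2 p.2)) = pvN2Step := rfl
  rw [hlam]
  have hnct : E.foldl pvEStep PySem.Dict.empty = F.items.foldl pvN2Step PySem.Dict.empty := by
    apply PySem.Dict.ext
    have hndA : (E.foldl pvEStep PySem.Dict.empty).keys.Nodup := by
      rw [hA1]; unfold pvClasses; exact PySem.Set.nodup_ofList _
    have hndB : (F.items.foldl pvN2Step PySem.Dict.empty).keys.Nodup := by
      rw [hB1, hcls]; unfold pvClasses; exact PySem.Set.nodup_ofList _
    rw [PySem.Dict.items_eq_map_keys _ hndA PySem.Dict.empty,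
      PySem.Dict.items_eq_map_keys _ hndB PySem.Dict.empty, hA1, hB1, hcls]
    apply List.map_congr_left
    intro c _
    have hinner : (E.foldl pvEStep PySem.Dict.empty).getD c PySem.Dict.empty
        = (F.items.foldl pvN2Step PySem.Dict.empty).getD c PySem.Dict.empty := by
      apply PySem.Dict.ext
      have hndIA : ((E.foldl pvEStep PySem.Dict.empty).getD c PySem.Dict.empty).keys.Nodup := by
        rw [hA2 c]; unfold pvTerms; exact PySem.Set.nodup_ofList _
      have hndIB : ((F.items.foldl pvN2Step PySem.Dict.empty).getD c
          PySem.Dict.empty).keys.Nodup := by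
        rw [hB2 c, hterms c]; unfold pvTerms; exact PySem.Set.nodup_ofList _
      rw [PySem.Dict.items_eq_map_keys _ hndIA 0, PySem.Dict.items_eq_map_keys _ hndIB 0,
        hA2 c, hB2 c, hterms c]
      apply List.map_congr_left
      intro t _
      rw [hA3 c t, hB3 c t, hks c t]
    rw [hinner]
  rw [hnct]
  -- the Vc dicts agree
  obtain ⟨hV1, hV2⟩ := pvVAChar (td.1.zip td.2)
  rw [← hE] at hV2
  have hsl : PySem.List.slice td.1 none (some ((td.2.length : Int))) = td.1.take td.2.length := by
    rw [PySem.List.slice_to td.1 (by positivity)]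
    simp
  rw [hsl]
  set vc0 := (td.1.take td.2.length).foldl (fun d c => d.insert c (0 : Int)) PySem.Dict.empty
    with hvc0def
  have hvc0k : vc0.keys = PySem.Set.ofList (td.1.take td.2.length) := by
    rw [hvc0def, PySem.Dict.keys_foldl_insert_key (td.1.take td.2.length) (fun c => c)
      (fun _ _ => (0 : Int)), PySem.Dict.keys_empty, PySem.Set.update_nil_left]
    simp
  have hvc0g : ∀ c, vc0.getD c 0 = 0 := by
    intro c
    exact pvVc0getD _ _ c (PySem.Dict.getD_empty _ _)
  have hmemk : ∀ p ∈ F.items, p.1.1 ∈ vc0.keys := by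
    intro p hp
    have h1 : p.1 ∈ F.keys := PySem.Dict.mem_keys_of_mem_items F hp
    rw [hFk] at h1
    have h2 : p.1 ∈ E.map (fun q => q.1) := by
      unfold pvKeys at h1
      exact (PySem.Set.mem_ofList _ _).mp h1
    rcases List.mem_map.mp h2 with ⟨q, hq, hqk⟩
    have h3 : q.1.1 ∈ (td.1.zip td.2).map (fun cd => cd.1) := pvMemCls _ q (by rw [hE] at hq; exact hq)
    rw [pvZfst td.1 td.2 pre] at h3
    rw [hvc0k]
    have : p.1.1 = q.1.1 := by rw [← hqk]
    rw [this]
    exact (PySem.Set.mem_ofList _ _).mpr h3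
  have hVB := pvVKeys F.items (fun p => p.1.1)
    (fun v p => v.getD p.1.1 0 + p.2) vc0 hmemk
  have hVBg : ∀ c, (F.items.foldl (fun v p => v.insert p.1.1 (v.getD p.1.1 0 + p.2)) vc0).getD c 0
      = pvClassSum E c := by
    intro c
    rw [pvVAdd F.items (fun p => p.1.1) (fun p => p.2) vc0 c, hvc0g c]
    rw [hFitems, List.filter_map, List.map_map]
    have h1 : ((fun (p : (String × String) × Int) => decide (p.1.1 = c))
        ∘ (fun k => (k, pvKeySum E k))) = fun (k : String × String) => decide (k.1 = c) := rfl
    have h2 : ((fun (p : (String × String) × Int) => p.2) ∘ (fun k => (k, pvKeySum E k)))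
        = pvKeySum E := rfl
    rw [h1, h2, pvPartition E c]
    ring
  have hvc : (td.1.zip td.2).foldl pvVZStep PySem.Dict.empty
      = F.items.foldl (fun v p => v.insert p.1.1 (v.getD p.1.1 0 + p.2)) vc0 := by
    apply PySem.Dict.ext
    have hndA : ((td.1.zip td.2).foldl pvVZStep PySem.Dict.empty).keys.Nodup := by
      rw [hV1]; exact PySem.Set.nodup_ofList _
    have hndB : (F.items.foldl (fun v p => v.insert p.1.1 (v.getD p.1.1 0 + p.2)) vc0).keys.Nodup := by
      rw [hVB, hvc0k]; exact PySem.Set.nodup_ofList _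
    rw [PySem.Dict.items_eq_map_keys _ hndA 0, PySem.Dict.items_eq_map_keys _ hndB 0,
      hVB, hvc0k, hV1, pvZfst td.1 td.2 pre]
    apply List.map_congr_left
    intro c _
    rw [hV2 c, hVBg c]
  rw [hvc]
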